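-- pv_equiv track=rewrite | github.com/STHLabUOL/MWSforDynWASN | modules/topology_tools.py | get_node_level_positions
-- ===== SOURCE A (Python) =====
-- def get_node_level_positions(nodes_levels):
--     '''
--     Returns dict that lists every nodes level-position.
--     Useful to predict the relative offset between synchronized signals.
--     {'node_id': int(level), ...}
--     '''
--     root_node = nodes_levels[0][0][0]
--     node_level_positions = {root_node: 0}
--     for lid, level in enumerate(nodes_levels):
--         for branch in level:
--             for node in branch:
--                 if node not in node_level_positions.keys():
--                     node_level_positions[node] = lid+1
--     return node_level_positions
-- ===== SOURCE B (Python) =====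
-- def get_node_level_positions(nodes_levels):
--     # Collect every level position of each node, then reduce each list to its
--     # minimum; finally pin the root node to level 0.
--     occurrences = {}
--     for lid, level in enumerate(nodes_levels):
--         for branch in level:
--             for node in branch:
--                 occurrences.setdefault(node, []).append(lid + 1)
--     result = {node: min(levels) for node, levels in occurrences.items()}
--     result[nodes_levels[0][0][0]] = 0
--     return result
-- ===== Notes on version B (the rewrite author's own statement) =====
-- stated objective: alternative
-- what changed: Replaces A's first-seen-guarded single dict pass by a collect-then-reduce: one walk appends every level occurrence per node, then a comprehension takes the minimum per node and the root is pinned to 0 afterwards.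
import Mathlib
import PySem

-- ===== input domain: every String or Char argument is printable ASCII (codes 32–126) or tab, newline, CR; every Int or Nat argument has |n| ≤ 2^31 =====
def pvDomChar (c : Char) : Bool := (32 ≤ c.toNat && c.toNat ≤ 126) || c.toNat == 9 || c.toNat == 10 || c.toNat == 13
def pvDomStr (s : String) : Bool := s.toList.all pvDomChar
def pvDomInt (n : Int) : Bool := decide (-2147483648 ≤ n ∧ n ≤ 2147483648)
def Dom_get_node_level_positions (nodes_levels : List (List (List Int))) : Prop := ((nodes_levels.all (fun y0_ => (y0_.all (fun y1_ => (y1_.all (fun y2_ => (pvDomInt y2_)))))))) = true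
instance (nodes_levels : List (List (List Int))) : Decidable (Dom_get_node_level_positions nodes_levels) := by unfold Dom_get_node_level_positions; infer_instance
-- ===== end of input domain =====

-- B replaces A's first-seen-guarded dict pass by collect-all-occurrences then reduce-by-minimum
-- (alternative decomposition, same cost); equivalence of the RETURN value on inputs where A does not raise.

-- ===== PORT A =====
def get_node_level_positions (nodes_levels : List (List (List Int))) : List (Int × Int) :=
  let root := ((nodes_levels.headD []).headD []).headD 0   -- nodes_levels[0][0][0]; Pre_ guarantees it exists
  ((PySem.List.enumerate nodes_levels 0).foldl (fun d le =>
      le.2.foldl (fun d branch =>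
        branch.foldl (fun d node =>
          if d.contains node then d else d.insert node (le.1 + 1)) d) d)
    (PySem.Dict.insert PySem.Dict.empty root 0)).items

-- ===== PORT B =====
def get_node_level_positions_alt (nodes_levels : List (List (List Int))) : List (Int × Int) :=
  let occ : PySem.Dict Int (List Int) :=
    (PySem.List.enumerate nodes_levels 0).foldl (fun occ le =>
      le.2.foldl (fun occ branch =>
        branch.foldl (fun occ node => occ.modify node [] (· ++ [le.1 + 1])) occ) occ)
      PySem.Dict.empty
  let result : PySem.Dict Int Int :=
    occ.items.foldl (fun d p => d.insert p.1 ((PySem.List.min? p.2 (fun x => x)).getD 0)) PySem.Dict.empty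
  let root := ((nodes_levels.headD []).headD []).headD 0   -- nodes_levels[0][0][0]
  (result.insert root 0).items

-- ===== PRECONDITION & SPEC =====
-- Pre_ excludes exactly the inputs on which A raises IndexError at nodes_levels[0][0][0]
-- (empty list, empty first level, or empty first branch); B raises there too.
def Pre_get_node_level_positions (nodes_levels : List (List (List Int))) : Prop :=
  0 < nodes_levels.length ∧ 0 < (nodes_levels.headD []).length ∧ 0 < ((nodes_levels.headD []).headD []).length
instance (nodes_levels : List (List (List Int))) : Decidable (Pre_get_node_level_positions nodes_levels) := by unfold Pre_get_node_level_positions; infer_instance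
def pvWitness_get_node_level_positions : List (List (List Int)) := [[[5, 7], [5]], [[7, 9]]]

def Spec_get_node_level_positions (nodes_levels : List (List (List Int))) (out : List (Int × Int)) : Prop := out = get_node_level_positions_alt nodes_levels
instance (nodes_levels : List (List (List Int))) (out : List (Int × Int)) : Decidable (Spec_get_node_level_positions nodes_levels out) := by unfold Spec_get_node_level_positions; infer_instance

-- ===== CLAIM (what is proved, stated in full; the proofs are below) =====
def Claim_equal_get_node_level_positions : Prop := ∀ (nodes_levels : List (List (List Int))), Dom_get_node_level_positions nodes_levels → Pre_get_node_level_positions nodes_levels → Spec_get_node_level_positions nodes_levels (get_node_level_positions nodes_levels)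

-- ===== LEMMAS AND PROOFS =====

-- the flattened occurrence stream: one (node, lid+1) pair per traversed node, in traversal order
def pvFlat (l : List (Int × List (List Int))) : List (Int × Int) :=
  l.flatMap (fun le => le.2.flatten.map (fun n => (n, le.1 + 1)))

def pvStepA (d : PySem.Dict Int Int) (p : Int × Int) : PySem.Dict Int Int :=
  if d.contains p.1 then d else d.insert p.1 p.2

def pvStepB (o : PySem.Dict Int (List Int)) (p : Int × Int) : PySem.Dict Int (List Int) :=
  o.modify p.1 [] (· ++ [p.2])

def pvMinv (ls : List Int) : Int := (PySem.List.min? ls (fun x => x)).getD 0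

def pvReduceB (o : PySem.Dict Int (List Int)) : PySem.Dict Int Int :=
  o.items.foldl (fun d p => d.insert p.1 (pvMinv p.2)) PySem.Dict.empty

def pvFinalB (root : Int) (o : PySem.Dict Int (List Int)) : PySem.Dict Int Int :=
  (pvReduceB o).insert root 0

-- the triple nested fold is the fold of the flattened stream (generic in the step)
theorem pvTripleFold {σ : Type} (step : σ → Int × Int → σ) :
    ∀ (l : List (Int × List (List Int))) (s : σ),
      l.foldl (fun s le =>
        le.2.foldl (fun s branch =>
          branch.foldl (fun s node => step s (node, le.1 + 1)) s) s) s
      = (pvFlat l).foldl step s := by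
  intro l
  induction l with
  | nil => intro s; simp [pvFlat]
  | cons le t ih =>
    intro s
    have hflat : pvFlat (le :: t) = le.2.flatten.map (fun n => (n, le.1 + 1)) ++ pvFlat t := by
      simp [pvFlat]
    rw [List.foldl_cons, ih, hflat, List.foldl_append]
    congr 1
    rw [List.foldl_map]
    induction le.2 generalizing s with
    | nil => simp
    | cons br brs ih2 => simp only [List.foldl_cons, List.flatten_cons, List.foldl_append, ih2]

theorem pvFlat_values_ge :
    ∀ (xs : List (List (List Int))) (s : Int) (q : Int × Int),
      q ∈ pvFlat (PySem.List.enumerate xs s) → s + 1 ≤ q.2 := by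
  intro xs
  induction xs with
  | nil => intro s q h; simp [pvFlat, PySem.List.enumerate_nil] at h
  | cons x t ih =>
    intro s q h
    simp only [pvFlat, PySem.List.enumerate_cons, List.flatMap_cons, List.mem_append] at h
    rcases h with h | h
    · obtain ⟨n, _, rfl⟩ := List.mem_map.mp h; simp
    · have := ih (s + 1) q h; omega

theorem pvFlat_pairwise :
    ∀ (xs : List (List (List Int))) (s : Int),
      (pvFlat (PySem.List.enumerate xs s)).Pairwise (fun p q => p.2 ≤ q.2) := by
  intro xs
  induction xs with
  | nil => intro s; simp [pvFlat, PySem.List.enumerate_nil]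
  | cons x t ih =>
    intro s
    simp only [pvFlat, PySem.List.enumerate_cons, List.flatMap_cons]
    rw [List.pairwise_append]
    refine ⟨?_, ih (s + 1), ?_⟩
    · refine List.Pairwise.map _ (fun a b hab => hab) ?_
      exact List.pairwise_iff_forall_sublist.mpr (fun _ => by simp_all)
    · intro a ha b hb
      obtain ⟨n, _, rfl⟩ := List.mem_map.mp ha
      have := pvFlat_values_ge t (s + 1) b hb
      simpa using by omega

theorem pvMinv_append (ls : List Int) (v : Int) (hne : ls ≠ []) (hle : ∀ x ∈ ls, x ≤ v) :
    pvMinv (ls ++ [v]) = pvMinv ls := by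
  obtain ⟨x, t, rfl⟩ := List.exists_cons_of_ne_nil hne
  simp only [pvMinv, List.cons_append, PySem.List.min?_id_cons, Option.getD_some,
    List.foldl_append, List.foldl_cons, List.foldl_nil]
  have h1 := PySem.List.foldl_min_le t x
  have hx : List.foldl min x t ≤ v := le_trans h1.1 (hle x (by simp))
  omega

theorem pvReduceB_items (o : PySem.Dict Int (List Int)) (hnd : o.keys.Nodup) :
    (pvReduceB o).items = o.items.map (fun p => (p.1, pvMinv p.2)) := by
  unfold pvReduceB
  rw [PySem.Dict.items_foldl_insert_fresh o.items (·.1) (fun p => pvMinv p.2) PySem.Dict.empty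
    (fun a _ => PySem.Dict.contains_empty _) (by simpa [PySem.Dict.keys] using hnd)]
  rfl

theorem pvModify_eq (o : PySem.Dict Int (List Int)) (k v : Int) :
    pvStepB o (k, v) = o.insert k (o.getD k [] ++ [v]) := rfl

theorem pvKeys_reduceB (o : PySem.Dict Int (List Int)) (hnd : o.keys.Nodup) :
    (pvReduceB o).keys = o.keys := by
  have h := pvReduceB_items o hnd
  simp [PySem.Dict.keys, h, List.map_map, Function.comp]

theorem pvContains_reduceB (o : PySem.Dict Int (List Int)) (hnd : o.keys.Nodup) (k : Int) :
    (pvReduceB o).contains k = o.contains k := by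
  rw [PySem.Dict.contains_eq_decide_mem_keys, PySem.Dict.contains_eq_decide_mem_keys,
    pvKeys_reduceB o hnd]

theorem pvContains_finalB (root : Int) (o : PySem.Dict Int (List Int))
    (hr : o.contains root = true) (hnd : o.keys.Nodup) (k : Int) :
    (pvFinalB root o).contains k = o.contains k := by
  unfold pvFinalB
  rw [PySem.Dict.contains_eq_decide_mem_keys,
    PySem.Dict.keys_insert_of_contains _ _ (by rw [pvContains_reduceB o hnd]; exact hr),
    pvKeys_reduceB o hnd, ← PySem.Dict.contains_eq_decide_mem_keys]

theorem pvMinv_single (v : Int) : pvMinv [v] = v := by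
  simp [pvMinv, PySem.List.min?_id_cons]

theorem pvStepEq (root k v : Int) (o : PySem.Dict Int (List Int))
    (hr : o.contains root = true) (hnd : o.keys.Nodup)
    (hne : ∀ p ∈ o.items, p.2 ≠ []) (hv : ∀ p ∈ o.items, ∀ x ∈ p.2, x ≤ v) :
    pvStepA (pvFinalB root o) (k, v) = pvFinalB root (pvStepB o (k, v)) := by
  have hcf : (pvFinalB root o).contains k = o.contains k := pvContains_finalB root o hr hnd k
  by_cases hc : o.contains k = true
  · have hA : pvStepA (pvFinalB root o) (k, v) = pvFinalB root o := by
      simp [pvStepA, hcf, hc]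
    rw [hA]
    suffices h : pvReduceB (pvStepB o (k, v)) = pvReduceB o by unfold pvFinalB; rw [h]
    apply PySem.Dict.ext
    have hnd' : (pvStepB o (k, v)).keys.Nodup := by
      rw [pvModify_eq, PySem.Dict.keys_insert_of_contains _ _ hc]; exact hnd
    rw [pvReduceB_items _ hnd', pvReduceB_items o hnd, pvModify_eq,
      PySem.Dict.items_insert_of_contains _ _ hc, List.map_map]
    apply List.map_congr_left
    intro p hp
    by_cases hpk : (p.1 == k) = true
    · have hpk' : p.1 = k := by simpa using hpk
      have hgd : o.getD k [] = p.2 := by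
        rw [← hpk']; exact PySem.Dict.getD_of_mem_items o (by simpa using hp) hnd []
      simp only [Function.comp, hpk, if_pos]
      rw [hgd, pvMinv_append p.2 v (hne p hp) (fun x hx => hv p hp x hx), hpk']
    · simp [Function.comp, hpk]
  · have hc' : o.contains k = false := by simpa using hc
    have hkrne : k ≠ root := by intro h; rw [h, hr] at hc'; cases hc'
    have hkr : (k == root) = false := by simpa using hkrne
    have hA : pvStepA (pvFinalB root o) (k, v) = (pvFinalB root o).insert k v := by
      simp [pvStepA, hcf, hc']
    rw [hA]
    have ho' : pvStepB o (k, v) = o.insert k [v] := by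
      rw [pvModify_eq, PySem.Dict.getD_of_not_contains _ _ hc']; rfl
    have hitems' : (o.insert k [v]).items = o.items ++ [(k, [v])] :=
      PySem.Dict.items_insert_of_not_contains o [v] hc'
    have hnd' : (o.insert k [v]).keys.Nodup := PySem.Dict.nodup_keys_insert _ _ _ hnd
    have hred : (pvReduceB (o.insert k [v])).items
        = (pvReduceB o).items ++ [(k, v)] := by
      rw [pvReduceB_items _ hnd', hitems', List.map_append, pvReduceB_items o hnd]
      simp [pvMinv_single]
    have hcr : (pvReduceB o).contains root = true := by rw [pvContains_reduceB o hnd]; exact hr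
    have hcr' : (pvReduceB (o.insert k [v])).contains root = true := by
      rw [pvContains_reduceB _ hnd', PySem.Dict.contains_insert]
      simp [hr]
    have hcfk : (pvFinalB root o).contains k = false := by rw [hcf]; exact hc'
    rw [ho']
    apply PySem.Dict.ext
    rw [PySem.Dict.items_insert_of_not_contains _ _ hcfk]
    unfold pvFinalB
    rw [PySem.Dict.items_insert_of_contains _ _ hcr', PySem.Dict.items_insert_of_contains _ _ hcr,
      hred, List.map_append]
    simp [hkrne]

theorem pvGetD_mem (o : PySem.Dict Int (List Int)) (k x : Int)
    (hx : x ∈ o.getD k []) : ∃ p ∈ o.items, p.1 = k ∧ x ∈ p.2 := by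
  by_cases hc : o.contains k = true
  · obtain ⟨ls, hls⟩ := Option.isSome_iff_exists.mp (by
      rw [← PySem.Dict.contains_eq_isSome_get? o k]; exact hc)
    have hmem := PySem.Dict.mem_items_of_get?_eq_some o hls
    refine ⟨(k, ls), hmem, rfl, ?_⟩
    rwa [PySem.Dict.getD_of_get?_eq_some o [] hls] at hx
  · rw [PySem.Dict.getD_of_not_contains _ _ (by simpa using hc)] at hx
    cases hx

theorem pvMain (root : Int) :
    ∀ (ps : List (Int × Int)) (o : PySem.Dict Int (List Int)),
      o.contains root = true →
      o.keys.Nodup →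
      (∀ p ∈ o.items, p.2 ≠ []) →
      (∀ p ∈ o.items, ∀ v ∈ p.2, ∀ q ∈ ps, v ≤ q.2) →
      ps.Pairwise (fun p q => p.2 ≤ q.2) →
      ps.foldl pvStepA (pvFinalB root o) = pvFinalB root (ps.foldl pvStepB o) := by
  intro ps
  induction ps with
  | nil => intro o _ _ _ _ _; rfl
  | cons p t ih =>
    obtain ⟨k, v⟩ := p
    intro o hr hnd hne hle hpw
    have hhead := (List.pairwise_cons.mp hpw).1
    have hpw' := (List.pairwise_cons.mp hpw).2
    rw [List.foldl_cons, List.foldl_cons,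
      pvStepEq root k v o hr hnd hne (fun p hp x hx => hle p hp x hx (k, v) (by simp))]
    apply ih
    · rw [pvModify_eq, PySem.Dict.contains_insert]
      simp [hr]
    · rw [pvModify_eq]; exact PySem.Dict.nodup_keys_insert _ _ _ hnd
    · intro p hp
      rw [pvModify_eq] at hp
      rcases (PySem.Dict.mem_items_insert _ _ _ _).mp hp with rfl | ⟨hp', _⟩
      · simp
      · exact hne p hp'
    · intro p hp x hx q hq
      rw [pvModify_eq] at hp
      rcases (PySem.Dict.mem_items_insert _ _ _ _).mp hp with rfl | ⟨hp', _⟩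
      · simp only [List.mem_append, List.mem_singleton] at hx
        rcases hx with hx | rfl
        · obtain ⟨p0, hp0, hp0k, hxp0⟩ := pvGetD_mem o k x hx
          exact hle p0 hp0 x hxp0 q (by simp [hq])
        · exact hhead q hq
      · exact hle p hp' x hx q (by simp [hq])
    · exact hpw'

theorem pvTripleFoldA (l : List (Int × List (List Int))) (d : PySem.Dict Int Int) :
    l.foldl (fun d le =>
      le.2.foldl (fun d branch =>
        branch.foldl (fun d node =>
          if d.contains node then d else d.insert node (le.1 + 1)) d) d) d
    = (pvFlat l).foldl pvStepA d := pvTripleFold pvStepA l d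

theorem pvTripleFoldB (l : List (Int × List (List Int))) (o : PySem.Dict Int (List Int)) :
    l.foldl (fun o le =>
      le.2.foldl (fun o branch =>
        branch.foldl (fun o node => o.modify node [] (· ++ [le.1 + 1])) o) o) o
    = (pvFlat l).foldl pvStepB o := pvTripleFold pvStepB l o

theorem get_node_level_positions_spec : Claim_equal_get_node_level_positions := by
  intro nl hdom hpre
  unfold Spec_get_node_level_positions
  obtain ⟨h1, h2, h3⟩ := hpre
  cases nl with
  | nil => simp at h1
  | cons l0 rest =>
  cases l0 with
  | nil => simp at h2
  | cons b0 brs =>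
  cases b0 with
  | nil => simp at h3
  | cons n0 ns =>
  simp only [get_node_level_positions, get_node_level_positions_alt, List.headD_cons]
  rw [pvTripleFoldA, pvTripleFoldB]
  have hps : pvFlat (PySem.List.enumerate (((n0 :: ns) :: brs) :: rest) 0)
      = (n0, 1) ::
          (List.map (fun n => (n, 1)) ns ++
            ((List.map (List.map fun n => (n, 1)) brs).flatten ++
              List.flatMap (fun le => (List.map (List.map fun n => (n, le.1 + 1)) le.2).flatten)
                (PySem.List.enumerate rest 1))) := by
    simp [pvFlat, PySem.List.enumerate_cons]
  set tl : List (Int × Int) :=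
      List.map (fun n => (n, 1)) ns ++
        ((List.map (List.map fun n => (n, 1)) brs).flatten ++
          List.flatMap (fun le => (List.map (List.map fun n => (n, le.1 + 1)) le.2).flatten)
            (PySem.List.enumerate rest 1)) with htl
  rw [hps, List.foldl_cons, List.foldl_cons]
  have hstepA1 : pvStepA (PySem.Dict.insert PySem.Dict.empty n0 0) (n0, 1)
      = PySem.Dict.insert PySem.Dict.empty n0 0 := by
    simp [pvStepA, PySem.Dict.contains_insert_self]
  have ho1 : pvStepB PySem.Dict.empty (n0, 1) = PySem.Dict.empty.insert n0 [1] := by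
    rw [pvModify_eq, PySem.Dict.getD_empty]; rfl
  have hio1 : ((PySem.Dict.empty.insert n0 [1] : PySem.Dict Int (List Int))).items
      = [(n0, [1])] := by
    rw [PySem.Dict.items_insert_of_not_contains _ _ (PySem.Dict.contains_empty n0)]; rfl
  have hd0 : PySem.Dict.insert PySem.Dict.empty n0 0
      = pvFinalB n0 (PySem.Dict.empty.insert n0 [1]) := by
    unfold pvFinalB pvReduceB
    rw [hio1]
    simp only [List.foldl_cons, List.foldl_nil, pvMinv_single]
    rw [PySem.Dict.insert_insert_self]
  have hBdef : ∀ X : PySem.Dict Int (List Int),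
      (X.items.foldl (fun d p => d.insert p.1 ((PySem.List.min? p.2 (fun x => x)).getD 0))
        PySem.Dict.empty).insert n0 0 = pvFinalB n0 X := fun X => rfl
  rw [hstepA1, ho1, hBdef, hd0]
  congr 1
  apply pvMain
  · exact PySem.Dict.contains_insert_self _ _ _
  · exact PySem.Dict.nodup_keys_insert _ _ _ (by decide)
  · intro p hp
    rw [hio1] at hp
    simp only [List.mem_singleton] at hp
    subst hp; simp
  · intro p hp x hx q hq
    rw [hio1] at hp
    simp only [List.mem_singleton] at hp
    subst hp
    simp only [List.mem_singleton] at hx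
    subst hx
    have := pvFlat_values_ge (((n0 :: ns) :: brs) :: rest) 0 q
      (by rw [hps]; exact List.mem_cons_of_mem _ hq)
    omega
  · have := pvFlat_pairwise (((n0 :: ns) :: brs) :: rest) 0
    rw [hps] at this
    exact (List.pairwise_cons.mp this).2
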